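-- pv_equiv track=rewrite | github.com/DMurray-Chadfield/learning_exercises | mod_comp_arch_org/babbage.py | perform_babbage_subtraction
-- ===== SOURCE A (Python) =====
-- def perform_babbage_subtraction(arg_sub, arg_acc, arg_carry=1):
--     return_carry = 1
--     while arg_sub != 0 or arg_carry == 0:
--         if arg_carry == 0:
--             arg_carry += 1
--         else:
--             arg_sub-= 1
--
--         arg_acc -= 1
--         arg_acc %= 10
--         if arg_acc == 9:
--             return_carry -= 1
--
--     return arg_sub, arg_acc, return_carry
-- ===== SOURCE B (Python) =====
-- def perform_babbage_subtraction(arg_sub, arg_acc, arg_carry=1):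
--     # closed form: n decrements total; count 9-wraps arithmetically
--     n = arg_sub + (1 if arg_carry == 0 else 0)
--     if n == 0:
--         return arg_sub, arg_acc, 1
--     final_acc = (arg_acc - n) % 10
--     k0 = arg_acc % 10 + 1          # first step index at which acc wraps to 9
--     wraps = (n - k0) // 10 + 1 if k0 <= n else 0
--     return 0, final_acc, 1 - wraps
-- ===== Notes on version B (the rewrite author's own statement) =====
-- stated objective: faster
-- what changed: Replaced the O(arg_sub) decrement loop with O(1) closed-form modular arithmetic: total decrements n, final digit (arg_acc-n)%10, and the number of 9-wraps counted by an arithmetic progression formula.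
-- outside the precondition, e.g. on perform_babbage_subtraction(-1, 5, 1): A does not finish within the time limit, B returns (0, 6, 1)
import Mathlib
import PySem

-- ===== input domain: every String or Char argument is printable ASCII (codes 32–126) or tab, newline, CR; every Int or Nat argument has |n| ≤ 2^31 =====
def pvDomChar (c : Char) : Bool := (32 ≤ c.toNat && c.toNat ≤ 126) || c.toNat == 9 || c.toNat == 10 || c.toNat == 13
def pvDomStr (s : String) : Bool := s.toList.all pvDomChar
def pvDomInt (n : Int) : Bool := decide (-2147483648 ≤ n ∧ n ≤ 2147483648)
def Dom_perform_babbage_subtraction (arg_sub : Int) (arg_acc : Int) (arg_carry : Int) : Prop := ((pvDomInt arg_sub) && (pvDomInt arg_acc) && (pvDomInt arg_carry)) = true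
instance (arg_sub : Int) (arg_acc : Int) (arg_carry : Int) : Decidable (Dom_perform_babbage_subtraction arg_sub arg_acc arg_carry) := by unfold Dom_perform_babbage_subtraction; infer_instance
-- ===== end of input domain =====

-- B replaces A's per-decrement while-loop by an O(1) closed-form modular computation of the final digit and the 9-wrap count (objective: faster, measured).


-- ===== PORT A =====
-- faithful transliteration of A's while-loop; fuel arg_sub.toNat + 2 bounds the iteration count
-- (the loop runs at most arg_sub + 1 iterations when 0 ≤ arg_sub; for arg_sub < 0 Python diverges, excluded by Pre_)
def babLoop : Nat → Int → Int → Int → Int → Int × Int × Int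
  | 0, sub, acc, rc, _ => (sub, acc, rc)
  | fuel+1, sub, acc, rc, carry =>
    if sub ≠ 0 ∨ carry = 0 then
      let sub2 := if carry = 0 then sub else sub - 1
      let carry2 := if carry = 0 then carry + 1 else carry
      let acc2 := PySem.Int.mod (acc - 1) 10
      let rc2 := if acc2 = 9 then rc - 1 else rc
      babLoop fuel sub2 acc2 rc2 carry2
    else (sub, acc, rc)

def perform_babbage_subtraction (arg_sub : Int) (arg_acc : Int) (arg_carry : Int) : Int × Int × Int :=
  babLoop (arg_sub.toNat + 2) arg_sub arg_acc 1 arg_carry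

-- ===== PORT B =====
-- B: O(1) closed form — n total decrements, final digit (arg_acc - n) % 10, 9-wraps counted arithmetically
def perform_babbage_subtraction_alt (arg_sub : Int) (arg_acc : Int) (arg_carry : Int) : Int × Int × Int :=
  let n := arg_sub + (if arg_carry = 0 then 1 else 0)
  if n = 0 then (arg_sub, arg_acc, 1)
  else
    let finalAcc := PySem.Int.mod (arg_acc - n) 10
    let k0 := PySem.Int.mod arg_acc 10 + 1
    let wraps := if k0 ≤ n then PySem.Int.floordiv (n - k0) 10 + 1 else 0
    (0, finalAcc, 1 - wraps)

-- ===== PRECONDITION & SPEC =====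
-- Pre_ excludes arg_sub < 0, on which A's while-loop never terminates (Python diverges).
def Pre_perform_babbage_subtraction (arg_sub : Int) (arg_acc : Int) (arg_carry : Int) : Prop := 0 ≤ arg_sub
instance (arg_sub : Int) (arg_acc : Int) (arg_carry : Int) : Decidable (Pre_perform_babbage_subtraction arg_sub arg_acc arg_carry) := by unfold Pre_perform_babbage_subtraction; infer_instance
def pvWitness_perform_babbage_subtraction : Int × Int × Int := (5, 3, 1)

def Spec_perform_babbage_subtraction (arg_sub : Int) (arg_acc : Int) (arg_carry : Int) (out : Int × Int × Int) : Prop := out = perform_babbage_subtraction_alt arg_sub arg_acc arg_carry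
instance (arg_sub : Int) (arg_acc : Int) (arg_carry : Int) (out : Int × Int × Int) : Decidable (Spec_perform_babbage_subtraction arg_sub arg_acc arg_carry out) := by unfold Spec_perform_babbage_subtraction; infer_instance

-- ===== CLAIM =====
def Claim_equal_perform_babbage_subtraction : Prop := ∀ (arg_sub : Int) (arg_acc : Int) (arg_carry : Int), Dom_perform_babbage_subtraction arg_sub arg_acc arg_carry → Pre_perform_babbage_subtraction arg_sub arg_acc arg_carry → Spec_perform_babbage_subtraction arg_sub arg_acc arg_carry (perform_babbage_subtraction arg_sub arg_acc arg_carry)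

-- ===== LEMMAS AND PROOFS =====
-- W n a = number of steps k in 1..n at which the digit wraps to 9, written with Int.emod/ediv (= PySem mod/floordiv for divisor 10 > 0)
def W (n a : Int) : Int := if a % 10 + 1 ≤ n then (n - (a % 10 + 1)) / 10 + 1 else 0

lemma pmod (x : Int) : PySem.Int.mod x 10 = x % 10 := PySem.Int.mod_eq_emod_of_pos (by norm_num)
lemma pdiv (x : Int) : PySem.Int.floordiv x 10 = x / 10 := PySem.Int.floordiv_eq_ediv_of_pos (by norm_num)

lemma babLoop_succ (f : Nat) (sub acc rc carry : Int) :
    babLoop (f+1) sub acc rc carry =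
      if sub ≠ 0 ∨ carry = 0 then
        babLoop f (if carry = 0 then sub else sub - 1) (PySem.Int.mod (acc - 1) 10)
          (if PySem.Int.mod (acc - 1) 10 = 9 then rc - 1 else rc)
          (if carry = 0 then carry + 1 else carry)
      else (sub, acc, rc) := rfl

lemma W_rec (n a : Int) (hn : 1 ≤ n) :
    W n a = (if (a-1) % 10 = 9 then 1 else 0) + W (n-1) ((a-1) % 10) := by
  unfold W
  split_ifs <;> omega

lemma loop_eq : ∀ (k fuel : Nat) (sub acc rc carry : Int),
    sub = (k : Int) → 0 ≤ acc → acc < 10 → carry ≠ 0 → k < fuel →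
    babLoop fuel sub acc rc carry = (0, (acc - sub) % 10, rc - W sub acc) := by
  intro k
  induction k with
  | zero =>
    intro fuel sub acc rc carry hs h0 h10 hc hf
    obtain ⟨f, rfl⟩ : ∃ f, fuel = f + 1 := ⟨fuel - 1, by omega⟩
    subst hs
    rw [babLoop_succ, if_neg (by simp [hc])]
    have h2 : W ((0:Nat):Int) acc = 0 := by unfold W; split_ifs <;> omega
    have h3 : (acc - ((0:Nat):Int)) % 10 = acc := by push_cast; omega
    rw [h2, h3]
    norm_num
  | succ k ih =>
    intro fuel sub acc rc carry hs h0 h10 hc hf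
    obtain ⟨f, rfl⟩ : ∃ f, fuel = f + 1 := ⟨fuel - 1, by omega⟩
    rw [babLoop_succ, if_pos (by left; omega)]
    simp only [if_neg hc, pmod]
    rw [ih f (sub - 1) ((acc - 1) % 10) _ carry (by omega) (by omega) (by omega) hc (by omega)]
    have hW : W sub acc = (if (acc-1) % 10 = 9 then 1 else 0) + W (sub-1) ((acc-1) % 10) :=
      W_rec sub acc (by omega)
    have hacc : ((acc - 1) % 10 - (sub - 1)) % 10 = (acc - sub) % 10 := by omega
    rw [hacc, hW]
    split_ifs <;> ring_nf

lemma alt_eq0 (s a : Int) (hs : 0 ≤ s) :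
    perform_babbage_subtraction_alt s a 0 = (0, (a - (s + 1)) % 10, 1 - W (s + 1) a) := by
  unfold perform_babbage_subtraction_alt
  simp only [reduceIte]
  rw [if_neg (by omega)]
  simp only [pmod, pdiv]
  unfold W
  rfl

lemma alt_eqz (a c : Int) (hc : c ≠ 0) :
    perform_babbage_subtraction_alt 0 a c = (0, a, 1) := by
  unfold perform_babbage_subtraction_alt
  rw [if_neg hc]
  norm_num

lemma alt_eqc (s a c : Int) (hc : c ≠ 0) (hz : s ≠ 0) :
    perform_babbage_subtraction_alt s a c = (0, (a - s) % 10, 1 - W s a) := by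
  unfold perform_babbage_subtraction_alt
  rw [if_neg hc]
  simp only [add_zero]
  rw [if_neg hz]
  simp only [pmod, pdiv]
  unfold W
  rfl

-- ===== VERDICT =====
theorem perform_babbage_subtraction_spec : Claim_equal_perform_babbage_subtraction := by
  intro s a c _ hpre
  unfold Spec_perform_babbage_subtraction perform_babbage_subtraction
  have hpre' : (0:Int) ≤ s := hpre
  by_cases hc : c = 0
  · subst hc
    rw [alt_eq0 s a hpre']
    show babLoop (s.toNat + 1 + 1) s a 1 0 = _
    rw [babLoop_succ, if_pos (Or.inr rfl)]
    simp only [reduceIte, pmod, zero_add]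
    rw [loop_eq s.toNat (s.toNat + 1) s ((a - 1) % 10) _ 1 (by omega) (by omega) (by omega) (by omega) (by omega)]
    have hW : W (s + 1) a = (if (a-1) % 10 = 9 then 1 else 0) + W s ((a-1) % 10) := by
      have := W_rec (s + 1) a (by omega); simpa using this
    have hacc : ((a - 1) % 10 - s) % 10 = (a - (s + 1)) % 10 := by omega
    rw [hacc, hW]
    split_ifs <;> ring_nf
  · by_cases hz : s = 0
    · subst hz
      rw [alt_eqz a c hc]
      show babLoop (0 + 1 + 1) 0 a 1 c = _
      rw [babLoop_succ, if_neg (by simp [hc])]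
    · rw [alt_eqc s a c hc hz]
      show babLoop (s.toNat + 1 + 1) s a 1 c = _
      rw [babLoop_succ, if_pos (Or.inl hz)]
      simp only [if_neg hc, pmod]
      rw [loop_eq (s.toNat - 1) (s.toNat + 1) (s - 1) ((a - 1) % 10) _ c (by omega) (by omega) (by omega) hc (by omega)]
      have hW : W s a = (if (a-1) % 10 = 9 then 1 else 0) + W (s-1) ((a-1) % 10) :=
        W_rec s a (by omega)
      have hacc : ((a - 1) % 10 - (s - 1)) % 10 = (a - s) % 10 := by omega
      rw [hacc, hW]
      split_ifs <;> ring_nf
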